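-- pv_equiv track=rewrite | github.com/thirunavukarasu-m/LeetCode | Problem solving_/Core Logic/print_pattern.py | pattern
-- ===== SOURCE A (Python) =====
-- def pattern(n):
--     if n < 0:
--         return [n]
--
--     result = []
--
--     while n > 0:
--         result.append(n)
--         n -= 5
--     result.append(n)
--     result.extend(result[::-1][1:])
--     return result
-- ===== SOURCE B (Python) =====
-- def pattern(n):
--     if n < 0:
--         return [n]
--     c = -(-n // 5)  # number of strictly positive descending terms after n... = ceil(n/5)
--     return [n - 5 * (c - abs(i - c)) for i in range(2 * c + 1)]
-- ===== Notes on version B (the rewrite author's own statement) =====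
-- stated objective: alternative
-- what changed: Replaces the while-loop that builds the descending half plus a reverse-and-extend mirroring pass by a single closed-form comprehension: the half length c+1 is computed by ceiling division and element i of the palindrome is emitted directly as n - 5*(c - |i - c|).
import Mathlib
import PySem

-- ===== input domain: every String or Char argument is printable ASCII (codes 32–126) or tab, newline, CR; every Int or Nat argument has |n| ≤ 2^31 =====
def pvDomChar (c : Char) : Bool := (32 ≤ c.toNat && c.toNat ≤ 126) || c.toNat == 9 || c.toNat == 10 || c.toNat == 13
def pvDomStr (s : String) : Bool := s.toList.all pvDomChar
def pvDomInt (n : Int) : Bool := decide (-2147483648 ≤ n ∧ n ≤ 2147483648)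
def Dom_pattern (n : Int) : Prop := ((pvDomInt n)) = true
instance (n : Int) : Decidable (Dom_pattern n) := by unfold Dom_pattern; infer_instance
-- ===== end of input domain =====

-- B replaces A's while-loop + reverse-extend mirroring by one closed-form comprehension (objective: alternative, same cost).

-- ===== PORT A =====
-- the while loop: appends n while n > 0, stepping n -= 5; returns (result, final n)
def patternLoop (n : Int) (result : List Int) : List Int × Int :=
  if n > 0 then patternLoop (n - 5) (result ++ [n]) else (result, n)
termination_by n.toNat
decreasing_by omega

def pattern (n : Int) : List Int :=
  if n < 0 then [n]
  else
    let p := patternLoop n []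
    let result := p.1 ++ [p.2]
    -- result[::-1][1:] : reverse then drop the first element (exact for lists)
    result ++ (result.reverse.drop 1)

-- ===== PORT B =====
def pattern_alt (n : Int) : List Int :=
  if n < 0 then [n]
  else
    let c := -(PySem.Int.floordiv (-n) 5)   -- -(-n // 5) = ceil(n/5)
    (PySem.List.pyRange 0 (2 * c + 1) 1).map (fun i => n - 5 * (c - |i - c|))

-- ===== PRECONDITION & SPEC =====
def Spec_pattern (n : Int) (out : List Int) : Prop := out = pattern_alt n
instance (n : Int) (out : List Int) : Decidable (Spec_pattern n out) := by unfold Spec_pattern; infer_instance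

-- ===== CLAIM (what is proved, stated in full; the proofs are below) =====
def Claim_equal_pattern : Prop := ∀ (n : Int), Dom_pattern n → Spec_pattern n (pattern n)

-- ===== LEMMAS AND PROOFS =====

theorem patternLoop_closed (m : Nat) : ∀ (n : Int) (acc : List Int),
    n ≤ 5 * m → 5 * m < n + 5 →
    patternLoop n acc = (acc ++ (List.range m).map (fun k : Nat => n - 5 * (k : Int)), n - 5 * m) := by
  induction m with
  | zero =>
      intro n acc h1 _
      rw [patternLoop]
      simp at h1 ⊢
      omega
  | succ m ih =>
      intro n acc h1 h2
      have hn : n > 0 := by push_cast at h1 h2 ⊢; omega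
      rw [patternLoop, if_pos hn]
      rw [ih (n - 5) (acc ++ [n]) (by push_cast at h1 ⊢; omega) (by push_cast at h2 ⊢; omega)]
      simp only [Prod.mk.injEq]
      constructor
      · rw [List.range_succ_eq_map]
        simp only [List.map_cons, List.map_map, List.append_assoc, List.singleton_append,
          Nat.cast_zero, mul_zero, sub_zero]
        congr 2
        apply List.map_congr_left
        intro a _
        simp only [Function.comp_apply]
        push_cast
        ring
      · push_cast
        ring

theorem pattern_eq_alt (n : Int) : pattern n = pattern_alt n := by
  by_cases hneg : n < 0
  · simp [pattern, pattern_alt, hneg]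
  · rw [not_lt] at hneg
    -- m = ceil(n/5)
    set m : Nat := ((n + 4) / 5).toNat with hm
    have hb1 : n ≤ 5 * m := by omega
    have hb2 : 5 * (m : Int) < n + 5 := by omega
    have hc : -(PySem.Int.floordiv (-n) 5) = (m : Int) := by
      rw [PySem.Int.neg_floordiv_neg_eq_iff_of_pos (by norm_num)]
      constructor <;> omega
    rw [pattern, pattern_alt, if_neg (by omega), if_neg (by omega)]
    simp only [hc]
    rw [patternLoop_closed m n [] hb1 hb2]
    simp only [List.nil_append]
    have hrange : (2 * (m : Int) + 1) = ((2 * m + 1 : Nat) : Int) := by push_cast; ring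
    rw [hrange, PySem.List.pyRange_zero_nat]
    -- both sides elementwise
    have hhalf : (List.range m).map (fun k : Nat => n - 5 * (k : Int)) ++ [n - 5 * m]
        = (List.range (m + 1)).map (fun k : Nat => n - 5 * (k : Int)) := by
      rw [List.range_succ]; simp
    rw [hhalf]
    apply List.ext_getElem
    · simp; omega
    · intro i hL hR
      simp only [List.length_append, List.length_map, List.length_range, List.length_drop,
        List.length_reverse] at hL
      rcases Nat.lt_or_ge i (m + 1) with hi | hi
      · rw [List.getElem_append_left (by simpa using hi)]
        simp only [List.getElem_map, List.getElem_range]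
        have : |(i : Int) - m| = (m : Int) - i := by
          rw [abs_of_nonpos (by omega)]; ring
        rw [this]; ring
      · rw [List.getElem_append_right (by simpa using hi)]
        simp only [List.getElem_drop, List.getElem_reverse, List.getElem_map,
          List.getElem_range, List.length_map, List.length_range]
        have hidx : m + 1 - 1 - (1 + (i - (m + 1))) = 2 * m - i := by omega
        rw [hidx]
        have : |(i : Int) - m| = (i : Int) - m := by
          rw [abs_of_nonneg (by omega)]
        rw [this]
        have : ((2 * m - i : Nat) : Int) = 2 * (m : Int) - i := by omega
        rw [this]; ring

-- ===== VERDICT (by name: the statement is the Claim_ definition above) =====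
theorem pattern_spec : Claim_equal_pattern := by
  intro n _
  unfold Spec_pattern
  exact pattern_eq_alt n
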